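-- pv_equiv track=rewrite | github.com/vutuancong/MachineLearning-ComputerVision | icecream/Affinity_propagationTrain.py | get_data_by_label
-- ===== SOURCE A (Python) =====
-- def get_data_by_label(feature_data,label_data,expect_label):
-- 	feature_dim = len(feature_data[0])
-- 	xs = []
-- 	ys = []
-- 	zs = []
-- 	for label_id, data_id in enumerate(feature_data):
-- 		if label_data[label_id] == expect_label:
-- 			if(feature_dim >=1):
-- 				xs.append(data_id[0])
-- 			if(feature_dim >=2):
-- 				ys.append(data_id[1])
-- 			if(feature_dim >=3):
-- 				zs.append(data_id[2])
-- 	return xs, ys, zs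
-- ===== SOURCE B (Python) =====
-- def get_data_by_label(feature_data, label_data, expect_label):
--     feature_dim = len(feature_data[0])
--     k = min(feature_dim, 3)
--     groups = {}
--     for row, lab in zip(feature_data, label_data):
--         cols = groups.setdefault(lab, ([], [], []))
--         for j, v in enumerate(row[:k]):
--             cols[j].append(v)
--     return groups.get(expect_label, ([], [], []))
-- ===== Notes on version B (the rewrite author's own statement) =====
-- stated objective: alternative
-- what changed: Instead of testing each row's label against expect_label and appending to three guarded accumulators, B builds a dict grouping ALL labels to column-triples in one pass (setdefault + per-column appends driven by enumerate(row[:k])) and then answers by a single dict lookup groups.get(expect_label, ([],[],[])).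
import Mathlib
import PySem

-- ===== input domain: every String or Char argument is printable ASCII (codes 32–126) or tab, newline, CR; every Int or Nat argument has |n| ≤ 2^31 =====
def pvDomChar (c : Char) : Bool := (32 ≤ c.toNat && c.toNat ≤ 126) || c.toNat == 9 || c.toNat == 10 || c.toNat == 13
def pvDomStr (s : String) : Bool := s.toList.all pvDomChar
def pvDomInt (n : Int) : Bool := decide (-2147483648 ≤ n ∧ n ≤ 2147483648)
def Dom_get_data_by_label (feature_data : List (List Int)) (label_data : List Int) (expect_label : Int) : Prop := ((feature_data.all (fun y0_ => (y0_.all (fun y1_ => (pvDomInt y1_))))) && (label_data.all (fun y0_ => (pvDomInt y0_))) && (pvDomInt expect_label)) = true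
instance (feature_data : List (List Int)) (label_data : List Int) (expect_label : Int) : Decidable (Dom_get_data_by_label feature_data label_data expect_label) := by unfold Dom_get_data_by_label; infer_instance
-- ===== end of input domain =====

-- B groups all rows by label into a dict of column-triples and answers by one lookup (alternative algorithm); same O(n) cost.

-- ===== PORT A =====
-- A's `for label_id, data_id in enumerate(feature_data)` loop, as structural recursion
-- carrying the running index and the three accumulators (xs, ys, zs).
def pvLoopA (label_data : List Int) (expect_label : Int) (feature_dim : Nat) :
    Nat → List (List Int) → (List Int × List Int × List Int) → List Int × List Int × List Int
  | _, [], acc => acc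
  | i, row :: rest, (xs, ys, zs) =>
    let acc :=
      match PySem.List.pyGet? label_data (i : Int) with
      | some v =>
        if v = expect_label then
          (if 1 ≤ feature_dim then xs ++ [(PySem.List.pyGet? row 0).getD 0] else xs,
           if 2 ≤ feature_dim then ys ++ [(PySem.List.pyGet? row 1).getD 0] else ys,
           if 3 ≤ feature_dim then zs ++ [(PySem.List.pyGet? row 2).getD 0] else zs)
        else (xs, ys, zs)
      | none => (xs, ys, zs)   -- IndexError: unreachable under Pre_
    pvLoopA label_data expect_label feature_dim (i + 1) rest acc

def get_data_by_label (feature_data : List (List Int)) (label_data : List Int) (expect_label : Int) : List Int × List Int × List Int :=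
  let feature_dim := ((PySem.List.pyGet? feature_data 0).getD []).length  -- len(feature_data[0]); [] unreachable under Pre_
  pvLoopA label_data expect_label feature_dim 0 feature_data ([], [], [])

-- ===== PORT B =====
-- `for j, v in enumerate(row[:k]): cols[j].append(v)` — append v to the j-th list of the triple
def pvAppendAt (cs : List Int × List Int × List Int) (j : Int) (v : Int) : List Int × List Int × List Int :=
  match j with
  | 0 => (cs.1 ++ [v], cs.2.1, cs.2.2)
  | 1 => (cs.1, cs.2.1 ++ [v], cs.2.2)
  | 2 => (cs.1, cs.2.1, cs.2.2 ++ [v])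
  | _ => cs                                  -- j ≥ 3 never occurs (k ≤ 3)

def pvRowInto (k : Nat) (row : List Int) (cs : List Int × List Int × List Int) : List Int × List Int × List Int :=
  (PySem.List.enumerate (PySem.List.slice row none (some (k : Int)))).foldl
    (fun cs p => pvAppendAt cs p.1 p.2) cs

-- `for row, lab in zip(feature_data, label_data): cols = groups.setdefault(lab, ([],[],[])); …appends…`
-- (the in-place appends on the shared tuple are modelled by re-inserting the updated triple)
def pvBuildB (k : Nat) :
    List (List Int × Int) → PySem.Dict Int (List Int × List Int × List Int) → PySem.Dict Int (List Int × List Int × List Int)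
  | [], d => d
  | (row, lab) :: rest, d =>
    let d' := d.setdefault lab ([], [], [])
    let cs := (d'.get? lab).getD ([], [], [])
    pvBuildB k rest (d'.insert lab (pvRowInto k row cs))

def get_data_by_label_alt (feature_data : List (List Int)) (label_data : List Int) (expect_label : Int) : List Int × List Int × List Int :=
  let feature_dim := ((PySem.List.pyGet? feature_data 0).getD []).length
  let k := min feature_dim 3
  let groups := pvBuildB k (feature_data.zip label_data) PySem.Dict.empty
  ((groups.get? expect_label).getD ([], [], []))

-- ===== PRECONDITION & SPEC =====
-- Pre_ excludes exactly the inputs where Python A raises: empty feature_data (len(feature_data[0])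
-- is an IndexError), label_data shorter than feature_data (label_data[i] raises), and a matching
-- row shorter than min(feature_dim, 3) (data_id[0]/[1]/[2] raises).
def Pre_get_data_by_label (feature_data : List (List Int)) (label_data : List Int) (expect_label : Int) : Prop :=
  feature_data ≠ [] ∧ feature_data.length ≤ label_data.length ∧
  ∀ i < feature_data.length,
    PySem.List.pyGet? label_data (i : Int) = some expect_label →
    min (feature_data.headD []).length 3 ≤ (feature_data.getD i []).length
instance (feature_data : List (List Int)) (label_data : List Int) (expect_label : Int) : Decidable (Pre_get_data_by_label feature_data label_data expect_label) := by unfold Pre_get_data_by_label; infer_instance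

def pvWitness_get_data_by_label : List (List Int) × List Int × Int := ([[1, 2, 3], [4, 5, 6]], [0, 1], 1)

def Spec_get_data_by_label (feature_data : List (List Int)) (label_data : List Int) (expect_label : Int) (out : List Int × List Int × List Int) : Prop := out = get_data_by_label_alt feature_data label_data expect_label
instance (feature_data : List (List Int)) (label_data : List Int) (expect_label : Int) (out : List Int × List Int × List Int) : Decidable (Spec_get_data_by_label feature_data label_data expect_label out) := by unfold Spec_get_data_by_label; infer_instance

-- ===== CLAIM (what is proved, stated in full; the proofs are below) =====
def Claim_equal_get_data_by_label : Prop := ∀ (feature_data : List (List Int)) (label_data : List Int) (expect_label : Int), Dom_get_data_by_label feature_data label_data expect_label → Pre_get_data_by_label feature_data label_data expect_label → Spec_get_data_by_label feature_data label_data expect_label (get_data_by_label feature_data label_data expect_label)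
-- ===== LEMMAS AND PROOFS =====

-- One lookup through B's grouping loop: the entry at l is obtained by folding pvRowInto
-- over exactly the rows whose label is l.
theorem pvBuildB_get (k : Nat) :
    ∀ (pairs : List (List Int × Int)) (d : PySem.Dict Int (List Int × List Int × List Int)) (l : Int),
      ((pvBuildB k pairs d).get? l).getD ([], [], []) =
        pairs.foldl (fun acc p => if p.2 = l then pvRowInto k p.1 acc else acc)
          ((d.get? l).getD ([], [], [])) := by
  intro pairs
  induction pairs with
  | nil => intro d l; simp [pvBuildB]
  | cons p rest ih =>
    obtain ⟨row, lab⟩ := p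
    intro d l
    simp only [pvBuildB, List.foldl_cons, ih]
    congr 1
    by_cases h : lab = l
    · subst h
      rw [if_pos rfl, PySem.Dict.get?_setdefault_self]
      simp [PySem.Dict.get?_insert_self]
    · rw [if_neg h]
      by_cases hc : d.contains lab
      · rw [PySem.Dict.setdefault_of_contains d ([], [], []) hc, PySem.Dict.get?_insert,
          if_neg (Ne.symm h)]
      · rw [PySem.Dict.setdefault_of_not_contains d ([], [], []) (by simpa using hc),
          PySem.Dict.get?_insert, if_neg (Ne.symm h),
          PySem.Dict.get?_insert, if_neg (Ne.symm h)]

-- On a row long enough, B's enumerate/append fold places row[0], row[1], row[2] exactly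
-- where A's three guarded appends do.
theorem pvRowInto_eq (k : Nat) (row : List Int) (xs ys zs : List Int)
    (hk : k ≤ 3) (hr : k ≤ row.length) :
    pvRowInto k row (xs, ys, zs) =
      (if 1 ≤ k then xs ++ [(PySem.List.pyGet? row 0).getD 0] else xs,
       if 2 ≤ k then ys ++ [(PySem.List.pyGet? row 1).getD 0] else ys,
       if 3 ≤ k then zs ++ [(PySem.List.pyGet? row 2).getD 0] else zs) := by
  interval_cases k
  · simp only [pvRowInto, PySem.List.slice_to_natCast]
    simp [PySem.List.enumerate_nil]
  · obtain ⟨a, t, rfl⟩ : ∃ a t, row = a :: t := by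
      match row, hr with
      | a :: t, _ => exact ⟨a, t, rfl⟩
    simp only [pvRowInto, PySem.List.slice_to_natCast]
    simp [pvAppendAt, PySem.List.enumerate_cons, PySem.List.enumerate_nil]
  · obtain ⟨a, b, t, rfl⟩ : ∃ a b t, row = a :: b :: t := by
      match row, hr with
      | a :: b :: t, _ => exact ⟨a, b, t, rfl⟩
    simp only [pvRowInto, PySem.List.slice_to_natCast]
    rw [show (1:Int) = ((1:Nat):Int) from rfl, PySem.List.pyGet?_natCast]
    simp [pvAppendAt, PySem.List.enumerate_cons, PySem.List.enumerate_nil,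
      PySem.List.pyGet?_zero_cons]
  · obtain ⟨a, b, c, t, rfl⟩ : ∃ a b c t, row = a :: b :: c :: t := by
      match row, hr with
      | a :: b :: c :: t, _ => exact ⟨a, b, c, t, rfl⟩
    simp only [pvRowInto, PySem.List.slice_to_natCast]
    rw [show (1:Int) = ((1:Nat):Int) from rfl, PySem.List.pyGet?_natCast,
      show (2:Int) = ((2:Nat):Int) from rfl, PySem.List.pyGet?_natCast]
    simp [pvAppendAt, PySem.List.enumerate_cons, PySem.List.enumerate_nil,
      PySem.List.pyGet?_zero_cons]

-- A's indexed loop is the same fold over zip(feature_data, label_data) that B's dict entry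
-- at expect_label unravels to, provided every matching row has length ≥ min(dim, 3).
theorem pvLoopA_eq_fold (ld : List Int) (el : Int) (dim : Nat) :
    ∀ (fd : List (List Int)) (i : Nat),
      i + fd.length ≤ ld.length →
      (∀ j, j < fd.length → ld[i + j]? = some el → min dim 3 ≤ (fd.getD j []).length) →
      ∀ xs ys zs,
        pvLoopA ld el dim i fd (xs, ys, zs) =
          (fd.zip (ld.drop i)).foldl
            (fun acc p => if p.2 = el then pvRowInto (min dim 3) p.1 acc else acc) (xs, ys, zs) := by
  intro fd
  induction fd with
  | nil => intro i _ _ xs ys zs; simp [pvLoopA]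
  | cons row rest ih =>
    intro i hlen hrows xs ys zs
    have hi : i < ld.length := by simp at hlen; omega
    have hdrop : ld.drop i = ld[i] :: ld.drop (i + 1) := List.drop_eq_getElem_cons hi
    have hget : PySem.List.pyGet? ld (i : Int) = some ld[i] := by
      rw [PySem.List.pyGet?_natCast]; exact List.getElem?_eq_getElem hi
    have hrows' : ∀ j, j < rest.length → ld[i + 1 + j]? = some el →
        min dim 3 ≤ (rest.getD j []).length := by
      intro j hj hje
      rw [show i + 1 + j = i + (j + 1) by omega] at hje
      have := hrows (j + 1) (by simp; omega) hje
      simpa using this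
    rw [hdrop]
    simp only [pvLoopA, hget, List.zip_cons_cons, List.foldl_cons]
    by_cases hv : ld[i] = el
    · rw [if_pos hv, if_pos hv]
      have hrow : min dim 3 ≤ row.length := by
        have := hrows 0 (by simp)
          (by rw [show i + 0 = i by omega, List.getElem?_eq_getElem hi, hv])
        simpa using this
      rw [ih (i + 1) (by simp at hlen ⊢; omega) hrows']
      rw [pvRowInto_eq (min dim 3) row xs ys zs (by omega) hrow]
      have hg1 : (1 ≤ min dim 3) = (1 ≤ dim) := by
        by_cases h : 1 ≤ dim <;> simp [h]
      have hg2 : (2 ≤ min dim 3) = (2 ≤ dim) := by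
        by_cases h : 2 ≤ dim <;> simp [h]
      have hg3 : (3 ≤ min dim 3) = (3 ≤ dim) := by
        by_cases h : 3 ≤ dim <;> simp [h]
      simp [hg1, hg2, hg3]
    · rw [if_neg hv, if_neg hv]
      exact ih (i + 1) (by simp at hlen ⊢; omega) hrows' xs ys zs

-- ===== VERDICT (by name: the statement is the Claim_ definition above) =====
theorem get_data_by_label_spec : Claim_equal_get_data_by_label := by
  intro fd ld el _ hpre
  obtain ⟨hne, hlen, hrows⟩ := hpre
  unfold Spec_get_data_by_label get_data_by_label get_data_by_label_alt
  obtain ⟨r0, rest, rfl⟩ : ∃ r0 rest, fd = r0 :: rest := by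
    cases fd with
    | nil => exact absurd rfl hne
    | cons r0 rest => exact ⟨r0, rest, rfl⟩
  rw [pvBuildB_get, pvLoopA_eq_fold ld el _ (r0 :: rest) 0 (by simpa using hlen)
    (fun j hj hje => by
      have := hrows j hj (by
        rw [PySem.List.pyGet?_natCast]
        rw [show (0 : Nat) + j = j by omega] at hje
        exact hje)
      simpa [PySem.List.pyGet?_zero_cons] using this)]
  simp [PySem.Dict.get?_empty]
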